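-- pv_equiv track=rewrite | github.com/weiT1993/CutQC | cutqc/post_process_helper.py | get_instance_init_meas
-- ===== SOURCE A (Python) =====
-- import itertools, copy, math
--
-- def get_instance_init_meas(init_label, meas_label):
--     """
--     Convert subcircuit entry init,meas into subcircuit instance init,meas
--     """
--     init_combinations = []
--     for x in init_label:
--         if x == "zero":
--             init_combinations.append(["zero"])
--         elif x == "I":
--             init_combinations.append(["+zero", "+one"])
--         elif x == "X":
--             init_combinations.append(["2plus", "-zero", "-one"])
--         elif x == "Y":
--             init_combinations.append(["2plusI", "-zero", "-one"])
--         elif x == "Z":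
--             init_combinations.append(["+zero", "-one"])
--         else:
--             raise Exception("Illegal initilization symbol :", x)
--     init_combinations = list(itertools.product(*init_combinations))
--
--     subcircuit_init_meas = []
--     for init in init_combinations:
--         subcircuit_init_meas.append((tuple(init), tuple(meas_label)))
--     return subcircuit_init_meas
-- ===== SOURCE B (Python) =====
-- _OPTIONS = {
--     "zero": ["zero"],
--     "I": ["+zero", "+one"],
--     "X": ["2plus", "-zero", "-one"],
--     "Y": ["2plusI", "-zero", "-one"],
--     "Z": ["+zero", "-one"],
-- }
--
-- def get_instance_init_meas(init_label, meas_label):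
--     """
--     Convert subcircuit entry init,meas into subcircuit instance init,meas
--     """
--     def combos(labels):
--         if not labels:
--             return [()]
--         x = labels[0]
--         if x not in _OPTIONS:
--             raise Exception("Illegal initilization symbol :", x)
--         rest = combos(labels[1:])
--         return [(opt,) + r for opt in _OPTIONS[x] for r in rest]
--
--     meas = tuple(meas_label)
--     return [(c, meas) for c in combos(list(init_label))]
-- ===== Notes on version B (the rewrite author's own statement) =====
-- stated objective: alternative
-- what changed: B replaces the validation loop + itertools.product + separate pairing loop by a single recursive combos() over init_label that looks options up in a dict and builds each (init, meas) pair directly.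
import Mathlib
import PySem

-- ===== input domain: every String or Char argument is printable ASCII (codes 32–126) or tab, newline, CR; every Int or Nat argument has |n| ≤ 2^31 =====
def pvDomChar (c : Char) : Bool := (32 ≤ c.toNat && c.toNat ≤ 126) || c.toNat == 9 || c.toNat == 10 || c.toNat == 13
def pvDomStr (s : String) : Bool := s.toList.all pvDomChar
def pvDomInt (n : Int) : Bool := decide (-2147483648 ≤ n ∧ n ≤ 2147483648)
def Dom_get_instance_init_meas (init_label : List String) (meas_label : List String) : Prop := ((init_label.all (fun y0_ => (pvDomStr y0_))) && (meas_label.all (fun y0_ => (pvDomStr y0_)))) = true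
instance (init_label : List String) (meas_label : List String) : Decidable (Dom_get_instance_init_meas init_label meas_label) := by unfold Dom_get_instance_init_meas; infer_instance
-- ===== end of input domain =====

-- B replaces the itertools.product call plus separate pairing loop by a structural
-- recursion on init_label that builds each combination head-first (objective: alternative decomposition).
-- On an illegal init symbol both Pythons raise; those inputs are outside Pre_.

-- ===== PORT A =====
-- per-symbol branch chain of A's validation loop; the illegal branch raises in Python
-- (excluded by Pre_), here it yields [] (unused on Pre_).
def pvOptsA (x : String) : List String :=
  if x = "zero" then ["zero"]
  else if x = "I" then ["+zero", "+one"]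
  else if x = "X" then ["2plus", "-zero", "-one"]
  else if x = "Y" then ["2plusI", "-zero", "-one"]
  else if x = "Z" then ["+zero", "-one"]
  else []

-- itertools.product(*lists), per its documented equivalent: left fold extending each
-- partial tuple by every element of the next list.
def pvProduct (lists : List (List String)) : List (List String) :=
  lists.foldl (fun acc opts => acc.flatMap (fun p => opts.map (fun o => p ++ [o]))) [[]]

def get_instance_init_meas (init_label : List String) (meas_label : List String) : List (List String × List String) :=
  let init_combinations := init_label.foldl (fun acc x => acc ++ [pvOptsA x]) []
  let init_combinations := pvProduct init_combinations
  init_combinations.foldl (fun acc init => acc ++ [(init, meas_label)]) []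

-- ===== PORT B =====
-- the _OPTIONS dict of Source B
def pvOptsDict : PySem.Dict String (List String) :=
  PySem.Dict.ofList [("zero", ["zero"]), ("I", ["+zero", "+one"]),
    ("X", ["2plus", "-zero", "-one"]), ("Y", ["2plusI", "-zero", "-one"]),
    ("Z", ["+zero", "-one"])]

-- Source B's recursive combos; the 'raise' branch (key missing, outside Pre_) yields [].
def pvCombos (labels : List String) : List (List String) :=
  match labels with
  | [] => [[]]
  | x :: rest =>
    let r := pvCombos rest
    ((pvOptsDict.get? x).getD []).flatMap (fun opt => r.map (fun c => opt :: c))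

def get_instance_init_meas_alt (init_label : List String) (meas_label : List String) : List (List String × List String) :=
  (pvCombos init_label).map (fun c => (c, meas_label))

-- ===== PRECONDITION & SPEC =====
-- Pre_ excludes exactly the inputs with an illegal init symbol, on which A raises Exception.
def Pre_get_instance_init_meas (init_label : List String) (meas_label : List String) : Prop :=
  init_label.all (fun x => x ∈ ["zero", "I", "X", "Y", "Z"]) = true
instance (init_label : List String) (meas_label : List String) : Decidable (Pre_get_instance_init_meas init_label meas_label) := by unfold Pre_get_instance_init_meas; infer_instance
def pvWitness_get_instance_init_meas : List String × List String := (["zero", "X", "I"], ["comp", "Z"])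

def Spec_get_instance_init_meas (init_label : List String) (meas_label : List String) (out : List (List String × List String)) : Prop := out = get_instance_init_meas_alt init_label meas_label
instance (init_label : List String) (meas_label : List String) (out : List (List String × List String)) : Decidable (Spec_get_instance_init_meas init_label meas_label out) := by unfold Spec_get_instance_init_meas; infer_instance

-- ===== CLAIM (what is proved, stated in full; the proofs are below) =====
def Claim_equal_get_instance_init_meas : Prop := ∀ (init_label : List String) (meas_label : List String), Dom_get_instance_init_meas init_label meas_label → Pre_get_instance_init_meas init_label meas_label → Spec_get_instance_init_meas init_label meas_label (get_instance_init_meas init_label meas_label)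

-- ===== LEMMAS AND PROOFS =====

-- the option tables of the two ports agree
theorem pvOpts_agree (x : String) : (pvOptsDict.get? x).getD [] = pvOptsA x := by
  by_cases h0 : x = "zero"
  · subst h0; decide
  by_cases h1 : x = "I"
  · subst h1; decide
  by_cases h2 : x = "X"
  · subst h2; decide
  by_cases h3 : x = "Y"
  · subst h3; decide
  by_cases h4 : x = "Z"
  · subst h4; decide
  have hd : pvOptsDict.items = [("zero", ["zero"]), ("I", ["+zero", "+one"]),
      ("X", ["2plus", "-zero", "-one"]), ("Y", ["2plusI", "-zero", "-one"]),
      ("Z", ["+zero", "-one"])] := rfl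
  simp only [PySem.Dict.get?, hd, List.find?]
  repeat' split <;> simp_all [pvOptsA]

-- A's first loop is a map
theorem pv_foldl_map (l : List String) (acc : List (List String)) :
    l.foldl (fun acc x => acc ++ [pvOptsA x]) acc = acc ++ l.map pvOptsA := by
  induction l generalizing acc with
  | nil => simp
  | cons x xs ih => simp [ih]

-- A's last loop is a map
theorem pv_foldl_pair (l : List (List String)) (m : List String)
    (acc : List (List String × List String)) :
    l.foldl (fun acc init => acc ++ [(init, m)]) acc = acc ++ l.map (fun c => (c, m)) := by
  induction l generalizing acc with
  | nil => simp
  | cons x xs ih => simp [ih]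

-- one product step, re-expressed head-first
theorem pv_step (opts : List String) (P : List (List String)) (p : List String) :
    (opts.map (fun o => p ++ [o])).flatMap (fun q => P.map (fun c => q ++ c))
      = (opts.flatMap (fun o => P.map (fun c => o :: c))).map (fun c => p ++ c) := by
  simp only [List.flatMap_map, List.map_flatMap, List.map_map]
  congr 1; funext o; congr 1; funext c
  simp

-- the product fold, characterized against the head-first recursion
theorem pv_product_aux (lists : List (List String)) (acc : List (List String)) :
    lists.foldl (fun acc opts => acc.flatMap (fun p => opts.map (fun o => p ++ [o]))) acc
      = acc.flatMap (fun p =>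
          (lists.foldr (fun opts r => opts.flatMap (fun o => r.map (fun c => o :: c))) [[]]).map
            (fun c => p ++ c)) := by
  induction lists generalizing acc with
  | nil => simp
  | cons opts rest ih =>
    simp only [List.foldl_cons, List.foldr_cons, ih, List.flatMap_assoc]
    congr 1
    funext p
    exact pv_step opts _ p

-- combos of B equals the head-first recursion over A's option lists
theorem pvCombos_foldr (l : List String) :
    pvCombos l = (l.map pvOptsA).foldr
      (fun opts r => opts.flatMap (fun o => r.map (fun c => o :: c))) [[]] := by
  induction l with
  | nil => rfl
  | cons x xs ih => simp [pvCombos, ih, pvOpts_agree]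

-- ===== VERDICT (by name: the statement is the Claim_ definition above) =====
theorem get_instance_init_meas_spec : Claim_equal_get_instance_init_meas := by
  intro init_label meas_label _ _
  show _ = _
  simp only [get_instance_init_meas, get_instance_init_meas_alt, pvProduct,
    pv_foldl_map, pv_foldl_pair, pv_product_aux, pvCombos_foldr]
  simp
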